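-- pv_equiv track=rewrite | github.com/tkyassine/Pidev-VF-4DS7-G5 | src/segmentation.py | _group_rectangles
-- ===== SOURCE A (Python) =====
-- def union(a, b):
--     x = min(a[0], b[0])
--     y = min(a[1], b[1])
--     w = max(a[0] + a[2], b[0] + b[2]) - x
--     h = max(a[1] + a[3], b[1] + b[3]) - y
--     return [x, y, w, h]
--
-- def _intersect(a, b):
--     x = max(a[0], b[0])
--     y = max(a[1], b[1])
--     w = min(a[0] + a[2], b[0] + b[2]) - x
--     h = min(a[1] + a[3], b[1] + b[3]) - y
--     if w < 0 or h < 0: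
--         return False
--     return True
--
-- def _group_rectangles(rec):
--     """
--     Uion intersecting rectangles.
--     Args:
--         rec - list of rectangles in form [x, y, w, h]
--     Return:
--         list of grouped ractangles
--     """
--     tested = [False for i in range(len(rec))]
--     final = []
--     i = 0
--     while i < len(rec):
--         if not tested[i]:
--             j = i + 1
--             while j < len(rec):
--                 if not tested[j] and _intersect(rec[i], rec[j]):
--                     rec[i] = union(rec[i], rec[j])
--                     tested[j] = True
--                     j = i
--                 j += 1
--             final += [rec[i]]
--         i += 1
--
--     return final
-- ===== SOURCE B (Python) =====
-- def _group_rectangles(rec):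
--     # Corner-box sweep: convert each rect to (x1, y1, x2, y2) once, then for each
--     # group leader repeatedly sweep the pending queue, absorbing every rectangle
--     # that touches the growing box, until a sweep absorbs nothing.
--     # (Unlike A, this does not mutate rec; equivalence is about the return value.)
--     pending = [((r[0], r[1], r[0] + r[2], r[1] + r[3]), r) for r in rec]
--     out = []
--     while pending:
--         (box, orig), rest = pending[0], pending[1:]
--         merged = False
--         changed = True
--         while changed:
--             changed = False
--             keep = []
--             for item in rest:
--                 b = item[0]
--                 if max(box[0], b[0]) <= min(box[2], b[2]) and max(box[1], b[1]) <= min(box[3], b[3]):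
--                     box = (min(box[0], b[0]), min(box[1], b[1]),
--                            max(box[2], b[2]), max(box[3], b[3]))
--                     merged = True
--                     changed = True
--                 else:
--                     keep.append(item)
--             rest = keep
--         out.append([box[0], box[1], box[2] - box[0], box[3] - box[1]] if merged else orig)
--         pending = rest
--     return out
-- ===== Notes on version B (the rewrite author's own statement) =====
-- stated objective: faster
-- what changed: B converts each rectangle to a corner box (x1,y1,x2,y2) once and grows each group by whole sweep passes over a pending queue until a pass absorbs nothing, instead of A's index/tested-array loop that restarts the scan from i+1 after every single merge and recomputes corners from [x,y,w,h] lists on each test; B does not mutate rec.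
-- outside the precondition, e.g. on _group_rectangles([[1, 2]]): A returns [[1, 2]], B raises IndexError
import Mathlib
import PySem

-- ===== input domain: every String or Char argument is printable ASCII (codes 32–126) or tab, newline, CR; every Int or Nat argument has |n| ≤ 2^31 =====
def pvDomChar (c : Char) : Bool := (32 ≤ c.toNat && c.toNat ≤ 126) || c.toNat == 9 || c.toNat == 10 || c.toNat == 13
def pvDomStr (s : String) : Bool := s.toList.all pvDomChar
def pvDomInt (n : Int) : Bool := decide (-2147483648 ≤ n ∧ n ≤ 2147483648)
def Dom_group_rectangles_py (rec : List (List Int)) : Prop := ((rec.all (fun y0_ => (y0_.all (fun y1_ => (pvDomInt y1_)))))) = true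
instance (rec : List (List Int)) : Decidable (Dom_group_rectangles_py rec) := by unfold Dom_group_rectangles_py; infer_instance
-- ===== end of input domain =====

-- B replaces A's per-merge scan restart by whole sweep passes over a corner-box queue; A mutates
-- its argument `rec` in place (B does not), so the equivalence proved here is about the return value only.

-- ===== PORT A =====
-- Python `union(a, b)`
def unionRect (a b : List Int) : List Int :=
  let x := min (a.getD 0 0) (b.getD 0 0)
  let y := min (a.getD 1 0) (b.getD 1 0)
  let w := max (a.getD 0 0 + a.getD 2 0) (b.getD 0 0 + b.getD 2 0) - x
  let h := max (a.getD 1 0 + a.getD 3 0) (b.getD 1 0 + b.getD 3 0) - y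
  [x, y, w, h]

-- Python `_intersect(a, b)`
def intersectRect (a b : List Int) : Bool :=
  let x := max (a.getD 0 0) (b.getD 0 0)
  let y := max (a.getD 1 0) (b.getD 1 0)
  let w := min (a.getD 0 0 + a.getD 2 0) (b.getD 0 0 + b.getD 2 0) - x
  let h := min (a.getD 1 0 + a.getD 3 0) (b.getD 1 0 + b.getD 3 0) - y
  if w < 0 ∨ h < 0 then false else true

-- termination helper for innerA (number of False entries strictly drops when one is set to True)
lemma count_false_set_lt (l : List Bool) (j : Nat) (h : l.getD j true = false) :
    (l.set j true).count false < l.count false := by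
  induction l generalizing j with
  | nil => simp [List.getD] at h
  | cons b t ih =>
    cases j with
    | zero =>
      simp [List.getD] at h
      subst h
      simp [List.set]
    | succ j =>
      have := ih j (by simpa [List.getD] using h)
      simp only [List.set, List.count_cons]
      omega

-- A's inner `while j < len(rec)` loop; `cur` is the running value of the (only ever written at
-- index i) mutated cell rec[i]; `j = i; j += 1` becomes `i+1`
def innerA (rec : List (List Int)) (tested : List Bool) (i j : Nat) (cur : List Int) :
    List Int × List Bool :=
  if hj : j < rec.length then
    if hc : tested.getD j true = false ∧ intersectRect cur (rec.getD j []) = true then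
      innerA rec (tested.set j true) i (i+1) (unionRect cur (rec.getD j []))
    else
      innerA rec tested i (j+1) cur
  else (cur, tested)
termination_by tested.count false * (rec.length + 1) + (rec.length - j)
decreasing_by
  · have h1 : (tested.set j true).count false + 1 ≤ tested.count false :=
      count_false_set_lt tested j hc.1
    have h2 : ((tested.set j true).count false + 1) * (rec.length + 1) ≤
        tested.count false * (rec.length + 1) := Nat.mul_le_mul_right _ h1
    rw [Nat.succ_mul] at h2
    exact Nat.lt_of_lt_of_le
      (Nat.lt_of_lt_of_le
        (Nat.add_lt_add_left (Nat.lt_succ_of_le (Nat.sub_le rec.length (i+1))) _) h2)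
      (Nat.le_add_right _ _)
  · exact Nat.add_lt_add_left (Nat.sub_succ_lt_self rec.length j hj) _

-- A's outer `while i < len(rec)` loop
def outerA (rec : List (List Int)) (tested : List Bool) (final : List (List Int)) (i : Nat) :
    List (List Int) :=
  if hi : i < rec.length then
    if tested.getD i true = false then
      outerA rec (innerA rec tested i (i+1) (rec.getD i [])).2
        (final ++ [(innerA rec tested i (i+1) (rec.getD i [])).1]) (i+1)
    else outerA rec tested final (i+1)
  else final
termination_by rec.length - i
decreasing_by
  · exact Nat.sub_succ_lt_self rec.length i hi
  · exact Nat.sub_succ_lt_self rec.length i hi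

def group_rectangles_py (rec : List (List Int)) : List (List Int) :=
  outerA rec (List.replicate rec.length false) [] 0

-- ===== PORT B =====
abbrev Box := Int × Int × Int × Int
abbrev Item := Box × List Int

-- `(r[0], r[1], r[0] + r[2], r[1] + r[3])`
def boxOf (r : List Int) : Box :=
  (r.getD 0 0, r.getD 1 0, r.getD 0 0 + r.getD 2 0, r.getD 1 0 + r.getD 3 0)

-- `max(box[0], b[0]) <= min(box[2], b[2]) and max(box[1], b[1]) <= min(box[3], b[3])`
def hitB : Box → Box → Bool
  | (x1, y1, x2, y2), (a, b, c, d) =>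
    decide (max x1 a ≤ min x2 c) && decide (max y1 b ≤ min y2 d)

def unionBox : Box → Box → Box
  | (x1, y1, x2, y2), (a, b, c, d) => (min x1 a, min y1 b, max x2 c, max y2 d)

-- `[box[0], box[1], box[2] - box[0], box[3] - box[1]]`
def fromBox : Box → List Int
  | (x1, y1, x2, y2) => [x1, y1, x2 - x1, y2 - y1]

-- one `for item in rest` pass: returns (grown box, kept items, changed?)
def sweep (box : Box) (items : List Item) : Box × List Item × Bool :=
  match items with
  | [] => (box, [], false)
  | p :: rest =>
    if hitB box p.1 then
      let s := sweep (unionBox box p.1) rest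
      (s.1, s.2.1, true)
    else
      let s := sweep box rest
      (s.1, p :: s.2.1, s.2.2)

lemma sweep_len_le (box : Box) (items : List Item) :
    (sweep box items).2.1.length ≤ items.length := by
  induction items generalizing box with
  | nil => simp [sweep]
  | cons p rest ih =>
    by_cases h : hitB box p.1
    · simp only [sweep, if_pos h, List.length_cons]
      have := ih (unionBox box p.1); omega
    · simp only [sweep, if_neg h, List.length_cons]
      have := ih box; omega

lemma sweep_len_lt (box : Box) (items : List Item) (h : (sweep box items).2.2 = true) :
    (sweep box items).2.1.length < items.length := by
  induction items generalizing box with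
  | nil => simp [sweep] at h
  | cons p rest ih =>
    by_cases hp : hitB box p.1
    · simp only [sweep, if_pos hp, List.length_cons]
      have := sweep_len_le (unionBox box p.1) rest; omega
    · simp only [sweep, if_neg hp, List.length_cons] at h ⊢
      have := ih box h; omega

-- `while changed:` — repeat sweeps until a pass absorbs nothing
def closeLoop (box : Box) (items : List Item) (merged : Bool) : Box × List Item × Bool :=
  if h : (sweep box items).2.2 = true then
    closeLoop (sweep box items).1 (sweep box items).2.1 true
  else ((sweep box items).1, (sweep box items).2.1, merged)
termination_by items.length
decreasing_by
  exact sweep_len_lt _ _ h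

lemma closeLoop_len_le (box : Box) (items : List Item) (m : Bool) :
    (closeLoop box items m).2.1.length ≤ items.length := by
  induction box, items, m using closeLoop.induct with
  | case1 box items m h ih =>
    rw [closeLoop]; simp only [dif_pos h]
    exact le_trans ih (sweep_len_le _ _)
  | case2 box items m h =>
    rw [closeLoop]; simp only [dif_neg h]
    exact sweep_len_le _ _

-- `while pending:` — emit one group per leader
def groupB (pending : List Item) : List (List Int) :=
  match pending with
  | [] => []
  | p :: rest =>
    (if (closeLoop p.1 rest false).2.2 then fromBox (closeLoop p.1 rest false).1 else p.2) ::
      groupB (closeLoop p.1 rest false).2.1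
termination_by pending.length
decreasing_by
  exact Nat.lt_succ_of_le (closeLoop_len_le _ _ _)

def group_rectangles_py_alt (rec : List (List Int)) : List (List Int) :=
  groupB (rec.map (fun r => (boxOf r, r)))

-- ===== PRECONDITION & SPEC =====
-- Pre_ excludes rectangles with fewer than 4 entries: on those Python A raises IndexError whenever an
-- intersection test runs (any input with ≥ 2 rectangles) and only returns for a lone short rectangle,
-- while B always raises there.
def Pre_group_rectangles_py (rec : List (List Int)) : Prop :=
  ∀ r ∈ rec, 4 ≤ r.length
instance (rec : List (List Int)) : Decidable (Pre_group_rectangles_py rec) := by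
  unfold Pre_group_rectangles_py; infer_instance

def pvWitness_group_rectangles_py : List (List Int) :=
  [[0, 0, 2, 2], [1, 1, 2, 2], [10, 10, 1, 1]]

def Spec_group_rectangles_py (rec : List (List Int)) (out : List (List Int)) : Prop := out = group_rectangles_py_alt rec
instance (rec : List (List Int)) (out : List (List Int)) : Decidable (Spec_group_rectangles_py rec out) := by unfold Spec_group_rectangles_py; infer_instance

-- ===== CLAIM (what is proved, stated in full; the proofs are below) =====
def Claim_equal_group_rectangles_py : Prop := ∀ (rec : List (List Int)), Dom_group_rectangles_py rec → Pre_group_rectangles_py rec → Spec_group_rectangles_py rec (group_rectangles_py rec)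

-- ===== LEMMAS AND PROOFS =====

-- box algebra
lemma boxOf_unionRect (a b : List Int) :
    boxOf (unionRect a b) = unionBox (boxOf a) (boxOf b) := by
  simp [unionRect, unionBox, boxOf]

lemma unionRect_eq_fromBox (a b : List Int) :
    unionRect a b = fromBox (unionBox (boxOf a) (boxOf b)) := by
  simp [unionRect, unionBox, boxOf, fromBox]

lemma intersect_eq_hit (a b : List Int) :
    intersectRect a b = hitB (boxOf a) (boxOf b) := by
  simp only [intersectRect, hitB, boxOf]
  split <;> rename_i h
  · simp only [Bool.false_eq, Bool.and_eq_false_iff, decide_eq_false_iff_not]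
    omega
  · simp only [Bool.true_eq, Bool.and_eq_true, decide_eq_true_eq]
    omega

lemma hit_mono (box q p : Box) (h : hitB box p = true) : hitB (unionBox box q) p = true := by
  obtain ⟨x1, y1, x2, y2⟩ := box; obtain ⟨a, b, c, d⟩ := q; obtain ⟨e, f, g, k⟩ := p
  simp [hitB, unionBox] at h ⊢
  omega

lemma unionBox_right_comm (box p q : Box) :
    unionBox (unionBox box p) q = unionBox (unionBox box q) p := by
  obtain ⟨x1, y1, x2, y2⟩ := box; obtain ⟨a, b, c, d⟩ := p; obtain ⟨e, f, g, k⟩ := q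
  simp [unionBox, Prod.ext_iff]
  omega

-- abstract absorption runs: absorb any currently-hitting item until none hits
inductive Run : Box → List Item → Box → List Item → Prop
  | done (box : Box) (items : List Item) (h : ∀ p ∈ items, hitB box p.1 = false) :
      Run box items box items
  | step (box : Box) (l r : List Item) (p : Item) (B : Box) (R : List Item)
      (hp : hitB box p.1 = true) (h : Run (unionBox box p.1) (l ++ r) B R) :
      Run box (l ++ p :: r) B R

lemma append_cons_eq_append_cons {α : Type} {l₁ r₁ l₂ r₂ : List α} {a b : α}
    (h : l₁ ++ a :: r₁ = l₂ ++ b :: r₂) :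
    (l₁ = l₂ ∧ a = b ∧ r₁ = r₂) ∨
    (∃ m, l₂ = l₁ ++ a :: m ∧ r₁ = m ++ b :: r₂) ∨
    (∃ m, l₁ = l₂ ++ b :: m ∧ r₂ = m ++ a :: r₁) := by
  induction l₁ generalizing l₂ with
  | nil =>
    cases l₂ with
    | nil => simp at h; tauto
    | cons x t => simp at h; exact Or.inr (Or.inl ⟨t, by simp [h.1, h.2]⟩)
  | cons x t ih =>
    cases l₂ with
    | nil => simp at h; exact Or.inr (Or.inr ⟨t, by simp [h.1, h.2]⟩)
    | cons y u =>
      simp at h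
      rcases ih h.2 with h1 | ⟨m, hm⟩ | ⟨m, hm⟩
      · exact Or.inl ⟨by simp [h.1, h1.1], h1.2.1, h1.2.2⟩
      · exact Or.inr (Or.inl ⟨m, by simp [h.1, hm.1, hm.2]⟩)
      · exact Or.inr (Or.inr ⟨m, by simp [h.1, hm.1, hm.2]⟩)

lemma run_exchange {box items B R} (h : Run box items B R) :
    ∀ (p : Item) (l r : List Item), items = l ++ p :: r → hitB box p.1 = true →
      Run (unionBox box p.1) (l ++ r) B R := by
  induction h with
  | done box items hno =>
    intro p l r heq hhit
    exfalso
    have := hno p (heq ▸ (by simp : p ∈ l ++ p :: r))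
    simp [this] at hhit
  | step box l' r' q Bx Rx hq hrun ih =>
    intro p l r heq hhit
    rcases append_cons_eq_append_cons heq with ⟨h1, h2, h3⟩ | ⟨m, hm1, hm2⟩ | ⟨m, hm1, hm2⟩
    · subst h1; subst h3; subst h2; exact hrun
    · -- l = l' ++ q :: m,  r' = m ++ p :: r
      subst hm1; subst hm2
      have step1 := ih p (l' ++ m) r (by simp) (hit_mono _ _ _ hhit)
      have : Run (unionBox (unionBox box p.1) q.1) (l' ++ (m ++ r)) Bx Rx := by
        rw [unionBox_right_comm]
        simpa using step1
      have := Run.step (unionBox box p.1) l' (m ++ r) q Bx Rx (hit_mono _ _ _ hq) this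
      simpa using this
    · -- l' = l ++ p :: m,  r = m ++ q :: r'
      subst hm1; subst hm2
      have step1 := ih p l (m ++ r') (by simp) (hit_mono _ _ _ hhit)
      have : Run (unionBox (unionBox box p.1) q.1) ((l ++ m) ++ r') Bx Rx := by
        rw [unionBox_right_comm]
        simpa using step1
      have := Run.step (unionBox box p.1) (l ++ m) r' q Bx Rx (hit_mono _ _ _ hq) this
      simpa using this

lemma run_unique {box items B1 R1} (h1 : Run box items B1 R1) :
    ∀ {B2 R2}, Run box items B2 R2 → B1 = B2 ∧ R1 = R2 := by
  induction h1 with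
  | done box items hno =>
    intro B2 R2 h2
    cases h2 with
    | done => exact ⟨rfl, rfl⟩
    | step box l r p B R hp h =>
      have := hno p (by simp)
      simp [this] at hp
  | step box l r p B R hp h ih =>
    intro B2 R2 h2
    exact ih (run_exchange h2 p l r rfl hp)

-- sweep lemmas
lemma sweep_false {box : Box} {items : List Item} (h : (sweep box items).2.2 = false) :
    (sweep box items).1 = box ∧ (sweep box items).2.1 = items ∧
      ∀ p ∈ items, hitB box p.1 = false := by
  induction items generalizing box with
  | nil => simp [sweep]
  | cons p rest ih =>
    by_cases hp : hitB box p.1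
    · simp [sweep, hp] at h
    · simp only [sweep, if_neg hp] at h ⊢
      obtain ⟨h1, h2, h3⟩ := ih (box := box) h
      refine ⟨h1, by rw [h2], ?_⟩
      intro q hq
      rcases List.mem_cons.mp hq with rfl | hq
      · simpa using hp
      · exact h3 q hq

lemma sweep_run {box : Box} {items : List Item} :
    ∀ (pre : List Item) {fB : Box} {fR : List Item},
      Run (sweep box items).1 (pre ++ (sweep box items).2.1) fB fR →
      Run box (pre ++ items) fB fR := by
  induction items generalizing box with
  | nil => intro pre fB fR h; simpa [sweep] using h
  | cons p rest ih =>
    intro pre fB fR h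
    by_cases hp : hitB box p.1
    · simp only [sweep, if_pos hp] at h
      have := ih (box := unionBox box p.1) pre h
      exact Run.step box pre rest p fB fR hp this
    · simp only [sweep, if_neg hp] at h
      have := ih (box := box) (pre ++ [p]) (by simpa using h)
      simpa using this

lemma closeLoop_spec (box : Box) (items : List Item) (flag : Bool) :
    Run box items (closeLoop box items flag).1 (closeLoop box items flag).2.1 ∧
    (closeLoop box items flag).2.1.length ≤ items.length ∧
    ((closeLoop box items flag).2.2 = true ↔
      (flag = true ∨ (closeLoop box items flag).2.1.length < items.length)) := by
  induction box, items, flag using closeLoop.induct with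
  | case1 box items flag h ih =>
    rw [closeLoop]; simp only [dif_pos h]
    obtain ⟨ihr, ihl, ihm⟩ := ih
    have hlt := sweep_len_lt box items h
    refine ⟨sweep_run [] ihr, by omega, ?_⟩
    constructor
    · intro _; right; omega
    · intro _; exact ihm.mpr (Or.inl rfl)
  | case2 box items flag h =>
    rw [closeLoop]; simp only [dif_neg h]
    have hb : (sweep box items).2.2 = false := by simpa using h
    obtain ⟨h1, h2, h3⟩ := sweep_false hb
    rw [h1, h2]
    refine ⟨Run.done box items h3, le_rfl, ?_⟩
    exact ⟨fun hf => Or.inl hf, fun hf => hf.elim id (fun hl => absurd hl (lt_irrefl _))⟩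

-- the untested suffix of A's state, as B-style items
def masked (rec : List (List Int)) (tested : List Bool) (k : Nat) : List Item :=
  if k < rec.length then
    (if tested.getD k true = false then [(boxOf (rec.getD k []), rec.getD k [])] else []) ++
      masked rec tested (k+1)
  else []
termination_by rec.length - k
decreasing_by exact Nat.sub_succ_lt_self rec.length k (by assumption)

lemma masked_ge (rec : List (List Int)) (tested : List Bool) (k : Nat) (h : rec.length ≤ k) :
    masked rec tested k = [] := by
  rw [masked]; simp [Nat.not_lt_of_le h]

lemma masked_lt (rec : List (List Int)) (tested : List Bool) (k : Nat) (h : k < rec.length) :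
    masked rec tested k =
      (if tested.getD k true = false then [(boxOf (rec.getD k []), rec.getD k [])] else []) ++
        masked rec tested (k+1) := by
  rw [masked]; simp [h]

lemma getD_false_lt (l : List Bool) (j : Nat) (h : l.getD j true = false) : j < l.length := by
  by_contra hc
  simp [List.getD_eq_getElem?_getD, List.getElem?_eq_none (by omega : l.length ≤ j)] at h

lemma masked_tested_set_lt (rec : List (List Int)) (tested : List Bool) {j k : Nat}
    (h : j < k) : masked rec (tested.set j true) k = masked rec tested k := by
  have main : ∀ n k, rec.length - k ≤ n → j < k →
      masked rec (tested.set j true) k = masked rec tested k := by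
    intro n
    induction n with
    | zero =>
      intro k hk _
      rw [masked_ge _ _ _ (by omega), masked_ge _ _ _ (by omega)]
    | succ n ih =>
      intro k hk hjk
      by_cases hkl : k < rec.length
      · rw [masked_lt _ _ _ hkl, masked_lt _ _ _ hkl]
        rw [ih (k+1) (by omega) (by omega)]
        have : (tested.set j true).getD k true = tested.getD k true := by
          simp [List.getD_eq_getElem?_getD, List.getElem?_set_ne (by omega : j ≠ k)]
        rw [this]
      · rw [masked_ge _ _ _ (by omega), masked_ge _ _ _ (by omega)]
  exact main (rec.length - k) k le_rfl h

lemma masked_mem (rec : List (List Int)) (tested : List Bool) :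
    ∀ (k : Nat) (p : Item), p ∈ masked rec tested k → ∃ j, k ≤ j ∧ j < rec.length ∧
      tested.getD j true = false ∧ p = (boxOf (rec.getD j []), rec.getD j []) := by
  have main : ∀ n k p, rec.length - k ≤ n → p ∈ masked rec tested k → ∃ j, k ≤ j ∧
      j < rec.length ∧ tested.getD j true = false ∧
      p = (boxOf (rec.getD j []), rec.getD j []) := by
    intro n
    induction n with
    | zero =>
      intro k p hk hp
      by_cases hkl : k < rec.length
      · omega
      · rw [masked_ge _ _ _ (by omega)] at hp; simp at hp
    | succ n ih =>
      intro k p hk hp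
      by_cases hkl : k < rec.length
      · rw [masked_lt _ _ _ hkl] at hp
        rcases List.mem_append.mp hp with hp | hp
        · by_cases ht : tested.getD k true = false
          · rw [if_pos ht] at hp
            simp at hp
            exact ⟨k, le_rfl, hkl, ht, hp⟩
          · rw [if_neg ht] at hp
            simp at hp
        · obtain ⟨j, h1, h2, h3, h4⟩ := ih (k+1) p (by omega) hp
          exact ⟨j, by omega, h2, h3, h4⟩
      · rw [masked_ge _ _ _ (by omega)] at hp; simp at hp
  intro k p hp
  exact main (rec.length - k) k p le_rfl hp

lemma masked_split (rec : List (List Int)) (tested : List Bool) {j k : Nat}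
    (hkj : k ≤ j) (hj : j < rec.length) (hf : tested.getD j true = false) :
    ∃ l r, masked rec tested k = l ++ (boxOf (rec.getD j []), rec.getD j []) :: r ∧
      masked rec (tested.set j true) k = l ++ r := by
  have hjt : j < tested.length := getD_false_lt tested j hf
  have main : ∀ n k, j - k ≤ n → k ≤ j →
      ∃ l r, masked rec tested k = l ++ (boxOf (rec.getD j []), rec.getD j []) :: r ∧
        masked rec (tested.set j true) k = l ++ r := by
    intro n
    induction n with
    | zero =>
      intro k hk hkj'
      have hkj'' : k = j := by omega
      subst hkj''
      refine ⟨[], masked rec tested (k+1), ?_, ?_⟩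
      · rw [masked_lt _ _ _ hj, if_pos hf]; simp
      · rw [masked_lt _ _ _ hj]
        have h1 : (tested.set k true).getD k true = true := by
          simp [List.getD_eq_getElem?_getD, List.getElem?_set_self hjt]
        rw [h1]
        simp [masked_tested_set_lt _ _ (by omega : k < k + 1)]
    | succ n ih =>
      intro k hk hkj'
      by_cases hkj2 : k = j
      · subst hkj2
        refine ⟨[], masked rec tested (k+1), ?_, ?_⟩
        · rw [masked_lt _ _ _ hj, if_pos hf]; simp
        · rw [masked_lt _ _ _ hj]
          have h1 : (tested.set k true).getD k true = true := by
            simp [List.getD_eq_getElem?_getD, List.getElem?_set_self hjt]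
          rw [h1]
          simp [masked_tested_set_lt _ _ (by omega : k < k + 1)]
      · obtain ⟨l, r, hl, hr⟩ := ih (k+1) (by omega) (by omega)
        have hkl : k < rec.length := by omega
        have hhead : (tested.set j true).getD k true = tested.getD k true := by
          simp [List.getD_eq_getElem?_getD, List.getElem?_set_ne (by omega : j ≠ k)]
        refine ⟨(if tested.getD k true = false then
            [(boxOf (rec.getD k []), rec.getD k [])] else []) ++ l, r, ?_, ?_⟩
        · rw [masked_lt _ _ _ hkl, hl]; simp
        · rw [masked_lt _ _ _ hkl, hhead, hr]; simp
  exact main (j - k) k le_rfl hkj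

lemma innerA_spec (i : Nat) (rec : List (List Int)) (tested : List Bool) (j : Nat)
    (cur : List Int) :
    i < j →
    (∀ k, i < k → k < j → tested.getD k true = false →
      hitB (boxOf cur) (boxOf (rec.getD k [])) = false) →
    Run (boxOf cur) (masked rec tested (i+1))
        (boxOf (innerA rec tested i j cur).1)
        (masked rec (innerA rec tested i j cur).2 (i+1)) ∧
    (innerA rec tested i j cur = (cur, tested) ∨
      ((masked rec (innerA rec tested i j cur).2 (i+1)).length <
          (masked rec tested (i+1)).length ∧
        (innerA rec tested i j cur).1 = fromBox (boxOf (innerA rec tested i j cur).1))) := by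
  induction tested, j, cur using innerA.induct (rec := rec) (i := i) with
  | case1 tested j cur hj hc ih =>
    intro hij hclean
    have hrw : innerA rec tested i j cur =
        innerA rec (tested.set j true) i (i+1) (unionRect cur (rec.getD j [])) := by
      rw [innerA]; simp only [dif_pos hj, dif_pos hc]
    obtain ⟨ihRun, ihD⟩ := ih (Nat.lt_succ_self i) (by intro k h1 h2; omega)
    obtain ⟨l, r, hsplit1, hsplit2⟩ := masked_split rec tested (by omega : i + 1 ≤ j) hj hc.1
    have hhit : hitB (boxOf cur) (boxOf (rec.getD j [])) = true := by
      rw [← intersect_eq_hit]; exact hc.2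
    rw [hrw]
    constructor
    · rw [hsplit1]
      refine Run.step _ l r _ _ _ hhit ?_
      have := ihRun
      rw [hsplit2, boxOf_unionRect] at this
      exact this
    · right
      rcases ihD with heq | ⟨hlt, hfb⟩
      · have h1 : (innerA rec (tested.set j true) i (i+1) (unionRect cur (rec.getD j []))).1 =
            unionRect cur (rec.getD j []) := by rw [heq]
        have h2 : (innerA rec (tested.set j true) i (i+1) (unionRect cur (rec.getD j []))).2 =
            tested.set j true := by rw [heq]
        constructor
        · rw [h2, hsplit2, hsplit1]; simp
        · rw [h1, boxOf_unionRect, unionRect_eq_fromBox]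
      · constructor
        · rw [hsplit2] at hlt
          rw [hsplit1]
          simp at hlt ⊢
          omega
        · exact hfb
  | case2 tested j cur hj hc ih =>
    intro hij hclean
    have hrw : innerA rec tested i j cur = innerA rec tested i (j+1) cur := by
      rw [innerA]; simp only [dif_pos hj, dif_neg hc]
    rw [hrw]
    refine ih (by omega) ?_
    intro k h1 h2 h3
    by_cases hkj : k = j
    · subst hkj
      have : ¬ intersectRect cur (rec.getD k []) = true := fun hint => hc ⟨h3, hint⟩
      rw [← intersect_eq_hit]
      simpa using this
    · exact hclean k h1 (by omega) h3
  | case3 tested j cur hj =>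
    intro hij hclean
    have hrw : innerA rec tested i j cur = (cur, tested) := by
      rw [innerA]; simp [hj]
    rw [hrw]
    refine ⟨?_, Or.inl rfl⟩
    apply Run.done
    intro p hp
    obtain ⟨j', h1, h2, h3, h4⟩ := masked_mem rec tested (i+1) p hp
    have := hclean j' (by omega) (by omega) h3
    rw [h4]
    exact this

lemma outer_spec (rec : List (List Int)) (tested : List Bool) (final : List (List Int)) (i : Nat) :
    outerA rec tested final i = final ++ groupB (masked rec tested i) := by
  induction tested, final, i using outerA.induct (rec := rec) with
  | case1 tested final i hi htest ih =>
    obtain ⟨hRun, hD⟩ := innerA_spec i rec tested (i+1) (rec.getD i []) (Nat.lt_succ_self i)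
      (by intro k h1 h2; omega)
    have hmaskedi : masked rec tested i =
        (boxOf (rec.getD i []), rec.getD i []) :: masked rec tested (i+1) := by
      rw [masked_lt _ _ _ hi, if_pos htest]; simp
    obtain ⟨hRunB, hlenB, hiffB⟩ :=
      closeLoop_spec (boxOf (rec.getD i [])) (masked rec tested (i+1)) false
    obtain ⟨hbox, hrem⟩ := run_unique hRun hRunB
    rw [outerA]; simp only [dif_pos hi, if_pos htest]
    rw [ih]
    rw [hmaskedi, groupB]
    have houthead : (if (closeLoop (boxOf (rec.getD i [])) (masked rec tested (i+1)) false).2.2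
        then fromBox (closeLoop (boxOf (rec.getD i [])) (masked rec tested (i+1)) false).1
        else rec.getD i []) = (innerA rec tested i (i+1) (rec.getD i [])).1 := by
      rcases hD with heq | ⟨hlt, hfb⟩
      · have h1 : (closeLoop (boxOf (rec.getD i [])) (masked rec tested (i+1)) false).2.1 =
            masked rec tested (i+1) := by
          rw [← hrem]
          have h2' : (innerA rec tested i (i+1) (rec.getD i [])).2 = tested := by rw [heq]
          rw [h2']
        have h2 : (closeLoop (boxOf (rec.getD i [])) (masked rec tested (i+1)) false).2.2 = false := by
          rcases Bool.eq_false_or_eq_true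
            (closeLoop (boxOf (rec.getD i [])) (masked rec tested (i+1)) false).2.2 with hb | hb
          · rcases hiffB.mp hb with hf | hf
            · simp at hf
            · rw [h1] at hf; omega
          · exact hb
        have h1p : (innerA rec tested i (i+1) (rec.getD i [])).1 = rec.getD i [] := by rw [heq]
        rw [if_neg (by rw [h2]; exact Bool.false_ne_true), h1p]
      · have h2 : (closeLoop (boxOf (rec.getD i [])) (masked rec tested (i+1)) false).2.2 = true := by
          apply hiffB.mpr
          right
          rw [← hrem]
          exact hlt
        rw [if_pos h2, ← hbox, ← hfb]
    rw [houthead, ← hrem]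
    simp
  | case2 tested final i hi htest ih =>
    have hmaskedi : masked rec tested i = masked rec tested (i+1) := by
      rw [masked_lt _ _ _ hi, if_neg htest]; simp
    rw [outerA]; simp only [dif_pos hi, if_neg htest]
    rw [ih, hmaskedi]
  | case3 tested final i hi =>
    rw [outerA]; simp only [dif_neg hi]
    rw [masked_ge _ _ _ (by omega)]
    simp [groupB]

lemma masked_replicate (rec : List (List Int)) (k : Nat) :
    masked rec (List.replicate rec.length false) k =
      (rec.drop k).map (fun r => (boxOf r, r)) := by
  have main : ∀ n k, rec.length - k ≤ n →
      masked rec (List.replicate rec.length false) k =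
        (rec.drop k).map (fun r => (boxOf r, r)) := by
    intro n
    induction n with
    | zero =>
      intro k hk
      by_cases hkl : k < rec.length
      · omega
      · rw [masked_ge _ _ _ (by omega), List.drop_eq_nil_of_le (by omega)]; simp
    | succ n ih =>
      intro k hk
      by_cases hkl : k < rec.length
      · have ht : (List.replicate rec.length false).getD k true = false := by
          simp [List.getD_eq_getElem?_getD, hkl]
        have hg : rec.getD k [] = rec[k] := by
          simp [List.getD_eq_getElem?_getD, List.getElem?_eq_getElem hkl]
        rw [masked_lt _ _ _ hkl, if_pos ht, ih (k+1) (by omega), hg,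
            List.drop_eq_getElem_cons hkl]
        simp only [List.map_cons, List.singleton_append]
      · rw [masked_ge _ _ _ (by omega), List.drop_eq_nil_of_le (by omega)]; simp
  exact main (rec.length - k) k le_rfl

-- ===== VERDICT (by name: the statement is the Claim_ definition above) =====
theorem group_rectangles_py_spec : Claim_equal_group_rectangles_py := by
  intro rec _ _
  unfold Spec_group_rectangles_py group_rectangles_py group_rectangles_py_alt
  rw [outer_spec rec _ [] 0]
  rw [masked_replicate]
  simp
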